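-- pv_equiv track=rewrite | github.com/albertolanzini/AdventOfCode2023 | python/day14/day14.py | _calculate_row
-- ===== SOURCE A (Python) =====
-- from typing import List
--
-- def _calculate_row(row: List[str]) -> int:
--     total, count = 0, 0
--
--     for i in range(len(row)-1, -1, -1):
--
--         if row[i] == 'O':
--             count += 1
--
--         if row[i] == '#':
--             if count == 0:
--                 continue
--             else:
--                 incr = len(row) - i - 1
--                 while count > 0:
--                     total += incr
--                     incr -= 1
--                     count -= 1
--
--     if count > 0:
--         incr = len(row)
--         while count > 0:
--             total += (incr)
--             incr -= 1
--             count -= 1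
--
--     return total
-- ===== SOURCE B (Python) =====
-- from typing import List
--
-- def _calculate_row(row: List[str]) -> int:
--     # Single forward pass: next_free is the first slot a rolling rock lands in.
--     total, next_free = 0, 0
--     for i, c in enumerate(row):
--         if c == '#':
--             next_free = i + 1
--         elif c == 'O':
--             total += len(row) - next_free
--             next_free += 1
--     return total
-- ===== Notes on version B (the rewrite author's own statement) =====
-- stated objective: simpler
-- what changed: B replaces A's reverse scan with a pending-rock counter and per-wall arithmetic-series inner while loops by a single forward pass keeping only a next-free-slot pointer and adding each rock's load immediately.
import Mathlib
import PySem

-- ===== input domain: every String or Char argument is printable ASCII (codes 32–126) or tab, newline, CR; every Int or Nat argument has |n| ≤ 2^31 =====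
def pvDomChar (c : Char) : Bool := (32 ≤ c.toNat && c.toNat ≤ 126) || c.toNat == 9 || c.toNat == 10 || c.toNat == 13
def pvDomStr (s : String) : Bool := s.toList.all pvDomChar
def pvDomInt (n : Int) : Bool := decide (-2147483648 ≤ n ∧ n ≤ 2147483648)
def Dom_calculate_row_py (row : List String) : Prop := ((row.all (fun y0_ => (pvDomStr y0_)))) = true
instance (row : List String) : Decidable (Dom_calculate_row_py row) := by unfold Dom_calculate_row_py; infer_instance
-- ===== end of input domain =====

-- B replaces A's reverse scan (pending-rock counter + per-wall arithmetic-series while loops)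
-- by a single forward pass with a next-free-slot pointer; same result, proved equivalent on all inputs.

-- ===== PORT A =====
-- the inner 'while count > 0: total += incr; incr -= 1; count -= 1' loop
-- (count is only ever 0, incremented by 1, or reset to 0 in A, so it is a Nat)
def emit (total incr : Int) : Nat → Int
  | 0 => total
  | c + 1 => emit (total + incr) (incr - 1) c

-- the 'for i in range(len(row)-1, -1, -1)' loop, as recursion on the descending index
-- (fuel i+1 processes index i then the indices below it); row.getD i "" is exact here
-- because every index this loop reads satisfies 0 ≤ i < len(row)
def aFor (row : List String) (n : Int) : Nat → (Int × Nat) → Int × Nat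
  | 0, st => st
  | i + 1, (total, count) =>
      let x := row.getD i ""
      let count := if x == "O" then count + 1 else count
      let st :=
        if x == "#" then
          if count = 0 then (total, count)
          else (emit total (n - (i : Int) - 1) count, 0)
        else (total, count)
      aFor row n i st

def calculate_row_py (row : List String) : Int :=
  let n : Int := row.length
  let st := aFor row n row.length (0, 0)
  if st.2 > 0 then emit st.1 n st.2 else st.1

-- ===== PORT B =====
-- 'for i, c in enumerate(row)' as structural recursion carrying the index i
def bLoop (n : Int) : List String → Int → (Int × Int) → Int × Int
  | [], _, st => st
  | x :: s, i, (total, nf) =>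
      bLoop n s (i + 1)
        (if x == "#" then (total, i + 1)
         else if x == "O" then (total + n - nf, nf + 1)
         else (total, nf))

def calculate_row_py_alt (row : List String) : Int :=
  (bLoop ((row.length : Int)) row 0 (0, 0)).1

-- ===== PRECONDITION & SPEC =====
def Spec_calculate_row_py (row : List String) (out : Int) : Prop := out = calculate_row_py_alt row
instance (row : List String) (out : Int) : Decidable (Spec_calculate_row_py row out) := by unfold Spec_calculate_row_py; infer_instance

-- ===== CLAIM (what is proved, stated in full; the proofs are below) =====
def Claim_equal_calculate_row_py : Prop := ∀ (row : List String), Dom_calculate_row_py row → Spec_calculate_row_py row (calculate_row_py row)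

-- ===== LEMMAS AND PROOFS =====

-- structural (foldr-style) rephrasing of A's loop: k = length of an extra suffix to the right
def agoG (k : Nat) (st : Int × Nat) : List String → Int × Nat
  | [] => st
  | x :: s =>
      let p := agoG k st s
      let c := if x == "O" then p.2 + 1 else p.2
      if x == "#" then
        if c = 0 then (p.1, c) else (emit p.1 ((s.length + k : Nat) : Int) c, 0)
      else (p.1, c)

-- index-free rephrasing of B's loop: cap = load the next rock to land would get
def bgo : List String → Int → Int
  | [], _ => 0
  | x :: s, cap =>
      if x == "#" then bgo s ((s.length : Int))
      else if x == "O" then cap + bgo s (cap - 1)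
      else bgo s cap

lemma emit_add (a : Int) : ∀ (c : Nat) (t i : Int), emit (t + a) i c = emit t i c + a := by
  intro c
  induction c with
  | zero => intro t i; simp [emit]
  | succ c ih =>
      intro t i
      show emit (t + a + i) (i - 1) c = emit (t + i) (i - 1) c + a
      have : t + a + i = (t + i) + a := by ring
      rw [this, ih]

lemma getD_append_cons : ∀ (l : List String) (y : String) (suf : List String),
    (l ++ y :: suf).getD l.length "" = y := by
  intro l y suf
  simp [List.getD]

lemma agoG_append_single (y : String) : ∀ (l : List String) (k : Nat) (st : Int × Nat),
    agoG k st (l ++ [y]) = agoG (k + 1) (agoG k st [y]) l := by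
  intro l
  induction l with
  | nil =>
      intro k st
      simp [agoG]
  | cons x s ih =>
      intro k st
      show agoG k st (x :: (s ++ [y])) = agoG (k + 1) (agoG k st [y]) (x :: s)
      simp only [agoG, ih]
      have hlen : (((s ++ [y]).length + k : Nat) : Int) = ((s.length + (k + 1) : Nat) : Int) := by
        simp; omega
      rw [hlen]

lemma aFor_eq_agoG : ∀ (pre suf : List String) (st : Int × Nat),
    aFor (pre ++ suf) (((pre ++ suf).length : Int)) pre.length st = agoG suf.length st pre := by
  intro pre
  induction pre using List.reverseRecOn with
  | nil => intro suf st; simp [aFor, agoG]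
  | append_singleton l y ih =>
      intro suf st
      obtain ⟨t, c⟩ := st
      have hrow : (l ++ [y]) ++ suf = l ++ y :: suf := by simp
      have hlen : (l ++ [y]).length = l.length + 1 := by simp
      rw [hrow, hlen, agoG_append_single]
      simp only [aFor]
      rw [getD_append_cons l y suf]
      rw [ih]
      have hk : (y :: suf).length = suf.length + 1 := rfl
      rw [hk]
      congr 1
      have hincr : (((l ++ y :: suf).length : Int)) - (l.length : Int) - 1
            = ((suf.length : Nat) : Int) := by simp
      rw [hincr]
      simp [agoG]

lemma bLoop_eq_bgo : ∀ (l : List String) (i t nf n : Int),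
    n = i + l.length → nf ≤ i → (bLoop n l i (t, nf)).1 = t + bgo l (n - nf) := by
  intro l
  induction l with
  | nil => intro i t nf n _ _; simp [bLoop, bgo]
  | cons x s ih =>
      intro i t nf n hn hnf
      show (bLoop n s (i + 1)
        (if x == "#" then (t, i + 1)
         else if x == "O" then (t + n - nf, nf + 1)
         else (t, nf))).1 = t + bgo (x :: s) (n - nf)
      by_cases h1 : x == "#"
      · have hcap : n - (i + 1) = ((s.length : Int)) := by
          simp [List.length_cons] at hn; omega
        rw [if_pos h1]
        rw [ih (i + 1) t (i + 1) n (by simp [List.length_cons] at hn ⊢; omega) le_rfl]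
        simp [bgo, h1, hcap]
      · rw [if_neg h1]
        by_cases h2 : x == "O"
        · rw [if_pos h2]
          rw [ih (i + 1) (t + n - nf) (nf + 1) n (by simp [List.length_cons] at hn ⊢; omega)
            (by omega)]
          have : n - (nf + 1) = (n - nf) - 1 := by ring
          rw [this]
          simp [bgo, h1, h2]
          ring
        · rw [if_neg h2]
          rw [ih (i + 1) t nf n (by simp [List.length_cons] at hn ⊢; omega) (by omega)]
          simp [bgo, h1, h2]
  
lemma bgo_eq_emit : ∀ (l : List String) (cap : Int), ((l.length : Int)) ≤ cap →
    bgo l cap = emit (agoG 0 (0, 0) l).1 cap (agoG 0 (0, 0) l).2 := by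
  intro l
  induction l with
  | nil => intro cap _; simp [bgo, agoG, emit]
  | cons x s ih =>
      intro cap hcap
      have hs : ((s.length : Int)) ≤ cap - 1 := by
        simp [List.length_cons] at hcap; omega
      by_cases h1 : x = "#"
      · subst h1
        have hc : bgo ("#" :: s) cap = bgo s ((s.length : Int)) := by simp [bgo]
        rw [hc, ih ((s.length : Int)) le_rfl]
        by_cases h0 : (agoG 0 (0, 0) s).2 = 0
        · simp [agoG, h0, emit]
        · simp [agoG, h0, emit]
      · by_cases h2 : x = "O"
        · subst h2
          have hc : bgo ("O" :: s) cap = cap + bgo s (cap - 1) := by simp [bgo]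
          rw [hc, ih (cap - 1) hs]
          simp only [agoG]
          norm_num
          show cap + emit (agoG 0 (0, 0) s).1 (cap - 1) (agoG 0 (0, 0) s).2
              = emit ((agoG 0 (0, 0) s).1 + cap) (cap - 1) (agoG 0 (0, 0) s).2
          rw [emit_add]
          ring
        · have hc : bgo (x :: s) cap = bgo s cap := by simp [bgo, h1, h2]
          rw [hc, ih cap (by simp [List.length_cons] at hcap; omega)]
          simp [agoG, h1, h2]

-- ===== VERDICT (by name: the statement is the Claim_ definition above) =====
theorem calculate_row_py_spec : Claim_equal_calculate_row_py := by
  intro row _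
  unfold Spec_calculate_row_py
  simp only [calculate_row_py, calculate_row_py_alt]
  have hA := aFor_eq_agoG row [] (0, 0)
  simp only [List.append_nil, List.length_nil] at hA
  rw [hA]
  have hB := bLoop_eq_bgo row 0 0 0 ((row.length : Int)) (by simp) le_rfl
  simp only [zero_add, sub_zero] at hB
  rw [hB]
  rw [bgo_eq_emit row ((row.length : Int)) le_rfl]
  by_cases hc : 0 < (agoG 0 (0, 0) row).2
  · simp [hc]
  · have h0 : (agoG 0 (0, 0) row).2 = 0 := by omega
    simp [h0, emit]
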